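-- pv_equiv track=rewrite | github.com/samleitermann/AdventofCode | problems/2023/Day4/Day4.py | part_two
-- ===== SOURCE A (Python) =====
-- def part_two(winning_numbers,card_numbers):
--
--     i = 0
--
--     cards = [1 for x in range(len(card_numbers))]
--
--     while i < len(card_numbers):
--
--         matches = 0
--
--         matches = sum(match in card_numbers[i] for match in winning_numbers[i])
--         card_multiplier = cards[i]
--
--         for j in range(matches):
--             cards[i+j+1] += 1*card_multiplier
--
--         i+=1
--
--     return (sum(cards))
-- ===== SOURCE B (Python) =====
-- def part_two(winning_numbers, card_numbers):
--     n = len(card_numbers)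
--     matches = [sum(m in card_numbers[i] for m in winning_numbers[i]) for i in range(n)]
--     totals = [0] * n
--     for i in range(n - 1, -1, -1):
--         totals[i] = 1 + sum(totals[i + 1 + j] for j in range(matches[i]))
--     return sum(totals)
-- ===== Notes on version B (the rewrite author's own statement) =====
-- stated objective: alternative
-- what changed: Replaces A's forward propagation (each card increments the counts of later cards by its multiplier) with a precomputed matches array and a backward recurrence totals[i] = 1 + sum of the totals of the cards it wins, summing those totals.
import Mathlib
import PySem

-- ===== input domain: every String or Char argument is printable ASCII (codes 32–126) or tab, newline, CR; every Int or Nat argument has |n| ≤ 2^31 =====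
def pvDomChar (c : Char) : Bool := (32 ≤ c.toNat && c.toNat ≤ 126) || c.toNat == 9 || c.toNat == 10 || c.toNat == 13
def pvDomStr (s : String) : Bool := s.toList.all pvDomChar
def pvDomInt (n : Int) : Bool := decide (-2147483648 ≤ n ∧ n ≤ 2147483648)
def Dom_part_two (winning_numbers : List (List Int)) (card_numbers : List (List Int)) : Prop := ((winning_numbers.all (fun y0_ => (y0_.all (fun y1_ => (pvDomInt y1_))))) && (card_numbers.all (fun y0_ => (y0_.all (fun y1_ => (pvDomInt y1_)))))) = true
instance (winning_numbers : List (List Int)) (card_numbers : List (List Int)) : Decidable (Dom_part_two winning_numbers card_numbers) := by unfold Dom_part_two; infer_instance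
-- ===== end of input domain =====

-- B replaces A's forward copy-propagation (each card bumps the counts of later cards by its
-- multiplier) with a precomputed matches array and a backward recurrence totals[i] = 1 + sum of
-- the totals of the cards card i wins: an alternative decomposition of the same cost.

-- ===== PORT A =====
-- matches = sum(match in card_numbers[i] for match in winning_numbers[i])  (a sum of booleans, i.e. a count)
def pvMatch (w c : List Int) : Nat := w.foldl (fun a x => a + (if x ∈ c then 1 else 0)) 0

-- for j in range(matches): cards[i+j+1] += 1*card_multiplier
def aInner (i : Nat) (mult : Int) (cards : List Int) (mi : Nat) : List Int :=
  (List.range mi).foldl (fun cs j => cs.set (i + j + 1) (cs.getD (i + j + 1) 0 + 1 * mult)) cards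

-- the while loop; Pre_ guarantees every index read/written is in range, where set/getD are exact
def aLoop (winning_numbers card_numbers : List (List Int)) (i : Nat) (cards : List Int) : List Int :=
  if _h : i < card_numbers.length then
    aLoop winning_numbers card_numbers (i + 1)
      (aInner i (cards.getD i 0) cards (pvMatch (winning_numbers.getD i []) (card_numbers.getD i [])))
  else cards
termination_by card_numbers.length - i

def part_two (winning_numbers : List (List Int)) (card_numbers : List (List Int)) : Int :=
  (aLoop winning_numbers card_numbers 0 (List.replicate card_numbers.length 1)).sum

-- ===== PORT B =====
-- totals[i] = 1 + sum(totals[i+1+j] for j in range(matches[i]))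
def bStep (ms : List Nat) (i : Nat) (t : List Int) : List Int :=
  t.set i (1 + (List.range (ms.getD i 0)).foldl (fun a j => a + t.getD (i + 1 + j) 0) 0)

-- for i in range(n-1, -1, -1): counter k+1 processes index k, then k-1, ..., then 0
def bLoop (ms : List Nat) : Nat → List Int → List Int
  | 0, t => t
  | k + 1, t => bLoop ms k (bStep ms k t)

def part_two_alt (winning_numbers : List (List Int)) (card_numbers : List (List Int)) : Int :=
  let n := card_numbers.length
  let ms := (List.range n).map (fun i => pvMatch (winning_numbers.getD i []) (card_numbers.getD i []))
  (bLoop ms n (List.replicate n 0)).sum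

-- ===== PRECONDITION & SPEC =====
-- Pre_ excludes exactly the inputs on which the Python A raises IndexError: a winning list missing
-- for some card, or a card whose matches run past the end of the card list (B raises there too).
def Pre_part_two (winning_numbers : List (List Int)) (card_numbers : List (List Int)) : Prop :=
  card_numbers.length ≤ winning_numbers.length ∧
  ∀ i < card_numbers.length,
    pvMatch (winning_numbers.getD i []) (card_numbers.getD i []) = 0 ∨
    i + pvMatch (winning_numbers.getD i []) (card_numbers.getD i []) < card_numbers.length

instance (winning_numbers : List (List Int)) (card_numbers : List (List Int)) : Decidable (Pre_part_two winning_numbers card_numbers) := by unfold Pre_part_two; infer_instance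

def pvWitness_part_two : List (List Int) × List (List Int) := ([[1], [2]], [[1, 5], [3]])

def Spec_part_two (winning_numbers : List (List Int)) (card_numbers : List (List Int)) (out : Int) : Prop := out = part_two_alt winning_numbers card_numbers
instance (winning_numbers : List (List Int)) (card_numbers : List (List Int)) (out : Int) : Decidable (Spec_part_two winning_numbers card_numbers out) := by unfold Spec_part_two; infer_instance

-- ===== CLAIM (what is proved, stated in full; the proofs are below) =====
def Claim_equal_part_two : Prop := ∀ (winning_numbers : List (List Int)) (card_numbers : List (List Int)), Dom_part_two winning_numbers card_numbers → Pre_part_two winning_numbers card_numbers → Spec_part_two winning_numbers card_numbers (part_two winning_numbers card_numbers)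

-- ===== LEMMAS AND PROOFS =====

-- reference value: the total number of cards produced by one original copy of card i
def Nref (mf : Nat → Nat) (n : Nat) (i : Nat) : Int :=
  if _h : i < n then
    1 + ((List.range (mf i)).map (fun j => Nref mf n (i + 1 + j))).sum
  else 0
termination_by n - i
decreasing_by omega

-- generic lemmas
theorem foldl_add_map (l : List Nat) (f : Nat → Int) (c : Int) :
    l.foldl (fun a j => a + f j) c = c + (l.map f).sum := by
  induction l generalizing c with
  | nil => simp
  | cons x xs ih => simp [List.foldl_cons, ih, add_assoc]

theorem sum_map_range_eq_finset (n : Nat) (f : Nat → Int) :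
    ((List.range n).map f).sum = ∑ i ∈ Finset.range n, f i := by
  induction n with
  | zero => simp
  | succ n ih => simp [List.range_succ, Finset.sum_range_succ, ih]

theorem sum_eq_sum_getD (l : List Int) :
    l.sum = ∑ i ∈ Finset.range l.length, l.getD i 0 := by
  induction l with
  | nil => simp
  | cons a t ih =>
      simp only [List.length_cons, Finset.sum_range_succ']
      simp [ih, add_comm]

theorem getD_map_range {n i : Nat} (f : Nat → Nat) (h : i < n) (d : Nat) :
    ((List.range n).map f).getD i d = f i := by
  rw [List.getD_eq_getElem?_getD]
  simp [h]

theorem getD_set_self {l : List Int} {i : Nat} {a : Int} (h : i < l.length) :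
    (l.set i a).getD i 0 = a := by
  rw [List.getD_eq_getElem?_getD, List.getElem?_set_self h]; rfl

theorem getD_set_ne {l : List Int} {i j : Nat} {a : Int} (h : i ≠ j) :
    (l.set i a).getD j 0 = l.getD j 0 := by
  rw [List.getD_eq_getElem?_getD, List.getElem?_set_ne h, ← List.getD_eq_getElem?_getD]

-- ===== B side =====
theorem bStep_length (ms : List Nat) (i : Nat) (t : List Int) :
    (bStep ms i t).length = t.length := by
  simp [bStep]

theorem bLoop_length (ms : List Nat) (k : Nat) (t : List Int) :
    (bLoop ms k t).length = t.length := by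
  induction k generalizing t with
  | zero => rfl
  | succ k ih => simp [bLoop, ih, bStep_length]

theorem bLoop_correct (ms : List Nat) (mf : Nat → Nat) (n : Nat)
    (hms : ∀ i < n, ms.getD i 0 = mf i)
    (hm : ∀ i < n, mf i = 0 ∨ i + mf i < n) :
    ∀ k ≤ n, ∀ t : List Int, t.length = n →
      (∀ i, k ≤ i → i < n → t.getD i 0 = Nref mf n i) →
      ∀ i < n, (bLoop ms k t).getD i 0 = Nref mf n i := by
  intro k
  induction k with
  | zero =>
      intro _ t _ ht i hi
      exact ht i (Nat.zero_le i) hi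
  | succ k ih =>
      intro hk t htl ht i hi
      show (bLoop ms k (bStep ms k t)).getD i 0 = Nref mf n i
      apply ih (Nat.le_of_succ_le hk) _ (by simp [bStep_length, htl])
      · intro j hkj hjn
        by_cases hjk : j = k
        · subst hjk
          have hjlen : j < t.length := htl ▸ hjn
          rw [bStep, getD_set_self hjlen]
          have hmsj : ms.getD j 0 = mf j := hms j hjn
          rw [hmsj, foldl_add_map]
          rw [Nref]
          simp only [hjn, dif_pos]
          congr 1
          rw [zero_add]
          congr 1
          apply List.map_congr_left
          intro x hx
          have hxlt : x < mf j := List.mem_range.mp hx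
          have hread : j + 1 + x < n := by
            rcases hm j hjn with h0 | hlt
            · omega
            · omega
          exact ht (j + 1 + x) (by omega) hread
        · rw [bStep, getD_set_ne (by omega)]
          exact ht j (by omega) hjn
      · exact hi

-- ===== A side =====
theorem aInner_succ_aux (i : Nat) (mult : Int) (cards : List Int) (m : Nat) :
    aInner i mult cards (m + 1) =
      (aInner i mult cards m).set (i + m + 1) ((aInner i mult cards m).getD (i + m + 1) 0 + 1 * mult) := by
  simp [aInner, List.range_succ, List.foldl_append]

theorem aInner_length (i : Nat) (mult : Int) (cards : List Int) (mi : Nat) :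
    (aInner i mult cards mi).length = cards.length := by
  induction mi with
  | zero => rfl
  | succ m ih =>
      rw [aInner_succ_aux]
      rw [List.length_set]
      exact ih

theorem aInner_getD (i : Nat) (mult : Int) (cards : List Int) :
    ∀ (mi : Nat), (mi = 0 ∨ i + mi < cards.length) → ∀ (t : Nat),
    (aInner i mult cards mi).getD t 0 =
      cards.getD t 0 + (if i < t ∧ t ≤ i + mi then mult else 0) := by
  intro mi
  induction mi with
  | zero =>
      intro _ t
      have : ¬ (i < t ∧ t ≤ i + 0) := by omega
      simp [aInner]
  | succ m ih =>
      intro hmi t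
      have hlt : i + (m + 1) < cards.length := by rcases hmi with h | h <;> omega
      have ihm := ih (Or.inr (by omega))
      rw [aInner_succ_aux]
      by_cases ht : t = i + m + 1
      · subst ht
        have hL : i + m + 1 < (aInner i mult cards m).length := by
          rw [aInner_length]; omega
        rw [getD_set_self hL, ihm]
        have h1 : ¬ (i < i + m + 1 ∧ i + m + 1 ≤ i + m) := by omega
        have h2 : (i < i + m + 1 ∧ i + m + 1 ≤ i + (m + 1)) := by omega
        simp [h2]
      · rw [getD_set_ne (by omega), ihm]
        by_cases h1 : i < t ∧ t ≤ i + m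
        · have h2 : (i < t ∧ t ≤ i + (m + 1)) := by omega
          simp [h1, h2]
        · have h2 : ¬ (i < t ∧ t ≤ i + (m + 1)) := by omega
          simp [h1, h2]

def Sval (mf : Nat → Nat) (n k : Nat) (cards : List Int) : Int :=
  ∑ t ∈ Finset.range n, (if t < k then cards.getD t 0 else cards.getD t 0 * Nref mf n t)

theorem Nref_eq (mf : Nat → Nat) (n k : Nat) (hk : k < n) :
    Nref mf n k = 1 + ∑ j ∈ Finset.range (mf k), Nref mf n (k + 1 + j) := by
  rw [Nref]
  simp only [hk, dif_pos]
  rw [sum_map_range_eq_finset]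

theorem Sval_step (mf : Nat → Nat) (n k : Nat) (cards : List Int)
    (hl : cards.length = n) (hk : k < n) (hmk : mf k = 0 ∨ k + mf k < n) :
    Sval mf n (k + 1) (aInner k (cards.getD k 0) cards (mf k)) = Sval mf n k cards := by
  set mult := cards.getD k 0 with hmult
  set mk := mf k with hmk'
  have hgetD : ∀ t, (aInner k mult cards mk).getD t 0 =
      cards.getD t 0 + (if k < t ∧ t ≤ k + mk then mult else 0) :=
    aInner_getD k mult cards mk (by omega)
  have pointwise : ∀ t ∈ Finset.range n,
      (if t < k + 1 then (aInner k mult cards mk).getD t 0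
        else (aInner k mult cards mk).getD t 0 * Nref mf n t) =
      (if t < k then cards.getD t 0 else cards.getD t 0 * Nref mf n t) +
      ((if t = k then mult * (1 - Nref mf n k) else 0) +
       (if k < t ∧ t ≤ k + mk then mult * Nref mf n t else 0)) := by
    intro t _
    rw [hgetD t]
    rcases Nat.lt_trichotomy t k with h | h | h
    · have c1 : t < k + 1 := by omega
      have c2 : ¬ (k < t ∧ t ≤ k + mk) := by omega
      have c3 : t ≠ k := by omega
      simp [c1, c2, c3, h]
    · subst h
      have c2 : ¬ (t < t ∧ t ≤ t + mk) := by omega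
      rw [if_pos (Nat.lt_succ_self t), if_neg c2, if_neg (lt_irrefl t), if_pos rfl, hmult,
        if_neg c2]
      ring
    · have c1 : ¬ (t < k + 1) := by omega
      have c3 : t ≠ k := by omega
      have c4 : ¬ (t < k) := by omega
      by_cases c2 : k < t ∧ t ≤ k + mk
      · rw [if_neg c1, if_pos c2, if_neg c4, if_neg c3, if_pos c2]
        ring
      · simp [c1, c2, c3, c4]
  rw [Sval, Finset.sum_congr rfl pointwise, Finset.sum_add_distrib, Finset.sum_add_distrib]
  have h1 : (∑ t ∈ Finset.range n, if t = k then mult * (1 - Nref mf n k) else 0)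
      = mult * (1 - Nref mf n k) := by
    rw [Finset.sum_ite_eq' (Finset.range n) k (fun _ => mult * (1 - Nref mf n k))]
    simp [hk]
  have h2 : (∑ t ∈ Finset.range n, if k < t ∧ t ≤ k + mk then mult * Nref mf n t else 0)
      = mult * (Nref mf n k - 1) := by
    have hmem : ∀ t ∈ Finset.range n,
        (if k < t ∧ t ≤ k + mk then mult * Nref mf n t else 0) =
        (if t ∈ Finset.Ico (k + 1) (k + 1 + mk) then mult * Nref mf n t else 0) := by
      intro t _
      have hiff : (k < t ∧ t ≤ k + mk) ↔ (t ∈ Finset.Ico (k + 1) (k + 1 + mk)) := by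
        rw [Finset.mem_Ico]; omega
      simp only [hiff]
    rw [Finset.sum_congr rfl hmem, Finset.sum_ite_mem]
    have hsub : Finset.range n ∩ Finset.Ico (k + 1) (k + 1 + mk) = Finset.Ico (k + 1) (k + 1 + mk) := by
      apply Finset.inter_eq_right.mpr
      intro t htm
      rw [Finset.mem_Ico] at htm
      rw [Finset.mem_range]
      omega
    rw [hsub, Finset.sum_Ico_eq_sum_range]
    have hred : k + 1 + mk - (k + 1) = mk := by omega
    rw [hred]
    have hNk : Nref mf n k - 1 = ∑ j ∈ Finset.range mk, Nref mf n (k + 1 + j) := by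
      rw [Nref_eq mf n k hk, ← hmk']
      ring
    rw [hNk, Finset.mul_sum]
  rw [h1, h2, Sval]
  ring

theorem aLoop_sum (wn cn : List (List Int))
    (hm : ∀ i < cn.length, pvMatch (wn.getD i []) (cn.getD i []) = 0 ∨
          i + pvMatch (wn.getD i []) (cn.getD i []) < cn.length) :
    ∀ (d k : Nat) (cards : List Int), cn.length - k ≤ d → cards.length = cn.length →
      (aLoop wn cn k cards).sum
        = Sval (fun i => pvMatch (wn.getD i []) (cn.getD i [])) cn.length k cards := by
  intro d
  induction d with
  | zero =>
      intro k cards hd hl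
      have hk : ¬ k < cn.length := by omega
      rw [aLoop, dif_neg hk, sum_eq_sum_getD, hl, Sval]
      apply Finset.sum_congr rfl
      intro t htm
      have := Finset.mem_range.mp htm
      rw [if_pos (by omega)]
  | succ d ih =>
      intro k cards hd hl
      by_cases hk : k < cn.length
      · rw [aLoop, dif_pos hk]
        rw [ih (k + 1) _ (by omega) (by rw [aInner_length, hl])]
        exact Sval_step _ cn.length k cards hl hk (hm k hk)
      · rw [aLoop, dif_neg hk, sum_eq_sum_getD, hl, Sval]
        apply Finset.sum_congr rfl
        intro t htm
        have := Finset.mem_range.mp htm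
        rw [if_pos (by omega)]

-- final composition pieces
theorem part_two_eq (wn cn : List (List Int))
    (hm : ∀ i < cn.length, pvMatch (wn.getD i []) (cn.getD i []) = 0 ∨
          i + pvMatch (wn.getD i []) (cn.getD i []) < cn.length) :
    (aLoop wn cn 0 (List.replicate cn.length 1)).sum
      = ∑ t ∈ Finset.range cn.length, Nref (fun i => pvMatch (wn.getD i []) (cn.getD i [])) cn.length t := by
  rw [aLoop_sum wn cn hm cn.length 0 _ (by omega) (by simp)]
  rw [Sval]
  apply Finset.sum_congr rfl
  intro t htm
  have ht := Finset.mem_range.mp htm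
  rw [if_neg (by omega)]
  simp [ht]

theorem part_two_alt_eq (wn cn : List (List Int))
    (hm : ∀ i < cn.length, pvMatch (wn.getD i []) (cn.getD i []) = 0 ∨
          i + pvMatch (wn.getD i []) (cn.getD i []) < cn.length) :
    (bLoop ((List.range cn.length).map (fun i => pvMatch (wn.getD i []) (cn.getD i []))) cn.length
        (List.replicate cn.length 0)).sum
      = ∑ t ∈ Finset.range cn.length, Nref (fun i => pvMatch (wn.getD i []) (cn.getD i [])) cn.length t := by
  set mf := fun i => pvMatch (wn.getD i []) (cn.getD i []) with hmf
  set ms := (List.range cn.length).map mf with hms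
  have hlen : (bLoop ms cn.length (List.replicate cn.length 0)).length = cn.length := by
    rw [bLoop_length, List.length_replicate]
  rw [sum_eq_sum_getD, hlen]
  apply Finset.sum_congr rfl
  intro t htm
  have ht := Finset.mem_range.mp htm
  exact bLoop_correct ms mf cn.length
    (fun i hi => getD_map_range mf hi 0) hm cn.length le_rfl _ (by simp)
    (fun i hi hin => by omega) t ht

-- ===== VERDICT (by name: the statement is the Claim_ definition above) =====
theorem part_two_spec : Claim_equal_part_two := by
  intro wn cn _ hpre
  show part_two wn cn = part_two_alt wn cn
  simp only [part_two, part_two_alt]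
  exact (part_two_eq wn cn hpre.2).trans (part_two_alt_eq wn cn hpre.2).symm
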